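-- pv_equiv track=rewrite | github.com/djpiper28/Ceaser-Cypher-Solver | ceaser shift brute forcer.py | freqTest
-- ===== SOURCE A (Python) =====
-- def freqTest(text):
--     test=0
--     a=0#a-z is counting the amount of these letter
--     b=0
--     c=0
--     d=0
--     e=0
--     f=0
--     g=0
--     h=0
--     i=0
--     j=0
--     k=0
--     l=0
--     m=0
--     n=0
--     o=0
--     p=0
--     q=0
--     r=0
--     s=0
--     t=0
--     u=0
--     v=0
--     w=0
--     x=0
--     y=0
--     z=0
--     while(test<len(text)):#if...=="a"... checks for letters and updates the count
--         if(text[test]=="a"):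
--            a=a+1
--         elif(text[test]=="b"):
--            b=b+1
--         elif(text[test]=="d"):
--            d=d+1
--         elif(text[test]=="c"):
--            c=c+1
--         elif(text[test]=="e"):
--            e=e+1
--         elif(text[test]=="f"):
--            f=f+1
--         elif(text[test]=="g"):
--            g=g+1
--         elif(text[test]=="h"):
--            h=h+1
--         elif(text[test]=="i"):
--            i=i+1
--         elif(text[test]=="j"):
--            j=j+1
--         elif(text[test]=="k"):
--            k=k+1
--         elif(text[test]=="l"):
--            l=l+1
--         elif(text[test]=="m"):
--            m=m+1
--         elif(text[test]=="n"):
--            n=n+1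
--         elif(text[test]=="o"):
--            o=o+1
--         elif(text[test]=="p"):
--            p=p+1
--         elif(text[test]=="q"):
--            q=q+1
--         elif(text[test]=="r"):
--            r=r+1
--         elif(text[test]=="s"):
--            s=s+1
--         elif(text[test]=="t"):
--            t=t+1
--         elif(text[test]=="u"):
--            u=u+1
--         elif(text[test]=="v"):
--            v=v+1
--         elif(text[test]=="w"):
--            w=w+1
--         elif(text[test]=="x"):
--            x=x+1
--         elif(text[test]=="y"):
--            y=y+1
--         elif(text[test]=="z"):
--            z=z+1
--         a=0
--         test = test + 1
--     if(max(a,b,c,d,e,f,g,h,i,j,k,l,m,n,o,p,q,r,s,t,u,v,w,x,y,z)==e):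
--         return True
--     else:
--         return False
-- ===== SOURCE B (Python) =====
-- def freqTest(text):
--     e = text.count('e')
--     return all(text.count(ch) <= e for ch in "abcdfghijklmnopqrstuvwxyz")
-- ===== Notes on version B (the rewrite author's own statement) =====
-- stated objective: simpler
-- what changed: Replaces A's 26-accumulator indexed while-loop plus 26-way max with one text.count('e') and a per-letter all(text.count(ch) <= e) comparison, and counts 'a' properly where A's 'a=0' reset discards it.
-- intended difference: On texts where 'a' occurs strictly more often than 'e' but every other letter at most as often, A returns True because its loop resets the 'a' counter to 0 on every iteration, while B returns False, the intended answer to whether 'e' is a most frequent letter. — e.g. on freqTest("aa"): A returns true, B returns false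
import Mathlib
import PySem

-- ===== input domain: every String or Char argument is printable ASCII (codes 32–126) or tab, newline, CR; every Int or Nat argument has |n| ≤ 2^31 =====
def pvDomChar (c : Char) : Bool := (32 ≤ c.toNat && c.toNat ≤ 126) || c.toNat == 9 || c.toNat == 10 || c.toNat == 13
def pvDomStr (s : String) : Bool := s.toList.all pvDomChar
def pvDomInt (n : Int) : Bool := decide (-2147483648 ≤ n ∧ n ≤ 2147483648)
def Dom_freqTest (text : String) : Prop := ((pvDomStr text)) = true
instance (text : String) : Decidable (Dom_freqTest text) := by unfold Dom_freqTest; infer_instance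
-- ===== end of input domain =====

-- ===== PORT A =====
-- the '[] case' final test of A: 'if max(a,...,z)==e: return True else return False'
def freqTestFinal (a b c d e f g h i j k l m n o p q r s t u v w x y z : Int) : Bool :=
  if max a (max b (max c (max d (max e (max f (max g (max h (max i (max j (max k (max l (max m (max n (max o (max p (max q (max r (max s (max t (max u (max v (max w (max x (max y (z))))))))))))))))))))))))) == e then true else false

-- A's while-loop over text[test], one accumulator per letter; each iteration ends with 'a=0',
-- so every recursive call passes 0 for a (in the 'a' branch a=a+1 is immediately overwritten).
def freqTestLoop (cs : List Char) (a b c d e f g h i j k l m n o p q r s t u v w x y z : Int) : Bool :=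
  match cs with
  | [] => freqTestFinal a b c d e f g h i j k l m n o p q r s t u v w x y z
  | ch :: rest =>
      if ch == 'a' then freqTestLoop rest 0 b c d e f g h i j k l m n o p q r s t u v w x y z
      else if ch == 'b' then freqTestLoop rest 0 (b + 1) c d e f g h i j k l m n o p q r s t u v w x y z
      else if ch == 'd' then freqTestLoop rest 0 b c (d + 1) e f g h i j k l m n o p q r s t u v w x y z
      else if ch == 'c' then freqTestLoop rest 0 b (c + 1) d e f g h i j k l m n o p q r s t u v w x y z
      else if ch == 'e' then freqTestLoop rest 0 b c d (e + 1) f g h i j k l m n o p q r s t u v w x y z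
      else if ch == 'f' then freqTestLoop rest 0 b c d e (f + 1) g h i j k l m n o p q r s t u v w x y z
      else if ch == 'g' then freqTestLoop rest 0 b c d e f (g + 1) h i j k l m n o p q r s t u v w x y z
      else if ch == 'h' then freqTestLoop rest 0 b c d e f g (h + 1) i j k l m n o p q r s t u v w x y z
      else if ch == 'i' then freqTestLoop rest 0 b c d e f g h (i + 1) j k l m n o p q r s t u v w x y z
      else if ch == 'j' then freqTestLoop rest 0 b c d e f g h i (j + 1) k l m n o p q r s t u v w x y z
      else if ch == 'k' then freqTestLoop rest 0 b c d e f g h i j (k + 1) l m n o p q r s t u v w x y z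
      else if ch == 'l' then freqTestLoop rest 0 b c d e f g h i j k (l + 1) m n o p q r s t u v w x y z
      else if ch == 'm' then freqTestLoop rest 0 b c d e f g h i j k l (m + 1) n o p q r s t u v w x y z
      else if ch == 'n' then freqTestLoop rest 0 b c d e f g h i j k l m (n + 1) o p q r s t u v w x y z
      else if ch == 'o' then freqTestLoop rest 0 b c d e f g h i j k l m n (o + 1) p q r s t u v w x y z
      else if ch == 'p' then freqTestLoop rest 0 b c d e f g h i j k l m n o (p + 1) q r s t u v w x y z
      else if ch == 'q' then freqTestLoop rest 0 b c d e f g h i j k l m n o p (q + 1) r s t u v w x y z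
      else if ch == 'r' then freqTestLoop rest 0 b c d e f g h i j k l m n o p q (r + 1) s t u v w x y z
      else if ch == 's' then freqTestLoop rest 0 b c d e f g h i j k l m n o p q r (s + 1) t u v w x y z
      else if ch == 't' then freqTestLoop rest 0 b c d e f g h i j k l m n o p q r s (t + 1) u v w x y z
      else if ch == 'u' then freqTestLoop rest 0 b c d e f g h i j k l m n o p q r s t (u + 1) v w x y z
      else if ch == 'v' then freqTestLoop rest 0 b c d e f g h i j k l m n o p q r s t u (v + 1) w x y z
      else if ch == 'w' then freqTestLoop rest 0 b c d e f g h i j k l m n o p q r s t u v (w + 1) x y z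
      else if ch == 'x' then freqTestLoop rest 0 b c d e f g h i j k l m n o p q r s t u v w (x + 1) y z
      else if ch == 'y' then freqTestLoop rest 0 b c d e f g h i j k l m n o p q r s t u v w x (y + 1) z
      else if ch == 'z' then freqTestLoop rest 0 b c d e f g h i j k l m n o p q r s t u v w x y (z + 1)
      else freqTestLoop rest 0 b c d e f g h i j k l m n o p q r s t u v w x y z

def freqTest (text : String) : Bool :=
  freqTestLoop text.toList 0 0 0 0 0 0 0 0 0 0 0 0 0 0 0 0 0 0 0 0 0 0 0 0 0 0

-- ===== PORT B =====
def freqTest_alt (text : String) : Bool :=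
  let e := PySem.Str.count text "e"
  "abcdfghijklmnopqrstuvwxyz".toList.all (fun ch => decide (PySem.Str.count text (String.ofList [ch]) ≤ e))

-- ===== PRECONDITION & SPEC =====
-- On texts where 'a' is strictly more frequent than 'e' while every other letter is at most as
-- frequent as 'e', A returns True (its 'a=0' reset keeps the 'a' count at 0 forever) while B
-- returns False, which is the intended answer to "is 'e' a most frequent letter".
def D_freqTest (text : String) : Prop :=
  text.toList.count 'e' < text.toList.count 'a' ∧
  ∀ ch ∈ "bcdfghijklmnopqrstuvwxyz".toList, text.toList.count ch ≤ text.toList.count 'e'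
instance (text : String) : Decidable (D_freqTest text) := by unfold D_freqTest; infer_instance

def Spec_freqTest (text : String) (out : Bool) : Prop := ¬ D_freqTest text → out = freqTest_alt text
instance (text : String) (out : Bool) : Decidable (Spec_freqTest text out) := by unfold Spec_freqTest; infer_instance

def pvDiffWitness_freqTest : String := "aa"
def pvDiffWitnessOut_freqTest : Bool × Bool := (true, false)

-- ===== CLAIM (what is proved, stated in full; the proofs are below) =====
def Claim_unchanged_freqTest : Prop := ∀ (text : String), Dom_freqTest text → Spec_freqTest text (freqTest text)
def Claim_changed_freqTest : Prop := Dom_freqTest (pvDiffWitness_freqTest) ∧ D_freqTest (pvDiffWitness_freqTest) ∧ freqTest (pvDiffWitness_freqTest) = pvDiffWitnessOut_freqTest.1 ∧ freqTest_alt (pvDiffWitness_freqTest) = pvDiffWitnessOut_freqTest.2 ∧ pvDiffWitnessOut_freqTest.1 ≠ pvDiffWitnessOut_freqTest.2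
def Claim_exact_freqTest : Prop := ∀ (text : String), Dom_freqTest text → D_freqTest text → freqTest text ≠ freqTest_alt text

-- ===== LEMMAS AND PROOFS =====
lemma goSingleton (c : Char) : ∀ (n : Nat) (l : List Char) (acc : Nat), l.length ≤ n →
    PySem.Chars.count.go [c] n l acc = acc + l.count c := by
  intro n
  induction n with
  | zero => intro l acc h; rw [List.length_eq_zero_iff.mp (Nat.le_zero.mp h)]; simp [PySem.Chars.count.go]
  | succ m ih =>
    intro l acc h
    cases l with
    | nil => simp [PySem.Chars.count.go]
    | cons x t =>
      simp only [PySem.Chars.count.go, List.isPrefixOf, List.count_cons]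
      by_cases hx : c = x
      · subst hx
        simp [ih t (acc+1) (by simpa using h)]
        omega
      · have : (c == x) = false := by simp [hx]
        simp [this, Ne.symm hx, ih t acc (by simpa using h)]
lemma charsCountSingleton (cs : List Char) (c : Char) :
    PySem.Chars.count cs [c] = cs.count c := by
  rw [PySem.Chars.count]
  simp [goSingleton c cs.length cs 0 le_rfl]

set_option maxHeartbeats 1000000 in
lemma loopCount (cs : List Char) : ∀ (b c d e f g h i j k l m n o p q r s t u v w x y z : Int),
    freqTestLoop cs 0 b c d e f g h i j k l m n o p q r s t u v w x y z =
    freqTestFinal 0 (b + (cs.count 'b' : Int)) (c + (cs.count 'c' : Int)) (d + (cs.count 'd' : Int)) (e + (cs.count 'e' : Int)) (f + (cs.count 'f' : Int)) (g + (cs.count 'g' : Int)) (h + (cs.count 'h' : Int)) (i + (cs.count 'i' : Int)) (j + (cs.count 'j' : Int)) (k + (cs.count 'k' : Int)) (l + (cs.count 'l' : Int)) (m + (cs.count 'm' : Int)) (n + (cs.count 'n' : Int)) (o + (cs.count 'o' : Int)) (p + (cs.count 'p' : Int)) (q + (cs.count 'q' : Int)) (r + (cs.count 'r' : Int)) (s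 + (cs.count 's' : Int)) (t + (cs.count 't' : Int)) (u + (cs.count 'u' : Int)) (v + (cs.count 'v' : Int)) (w + (cs.count 'w' : Int)) (x + (cs.count 'x' : Int)) (y + (cs.count 'y' : Int)) (z + (cs.count 'z' : Int)) := by
  induction cs with
  | nil => intro b c d e f g h i j k l m n o p q r s t u v w x y z; simp [freqTestLoop]
  | cons ch ts ih =>
    intro b c d e f g h i j k l m n o p q r s t u v w x y z
    simp only [freqTestLoop]
    by_cases h0 : (ch == 'a') = true
    · have hc : ch = 'a' := by simpa using h0
      subst hc
      rw [if_pos h0, ih]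
      congr 1 <;> simp [List.count_cons] <;> (push_cast ; ring)
    · rw [if_neg h0]
      by_cases h1 : (ch == 'b') = true
      · have hc : ch = 'b' := by simpa using h1
        subst hc
        rw [if_pos h1, ih]
        congr 1 <;> simp [List.count_cons] <;> (push_cast ; ring)
      · rw [if_neg h1]
        by_cases h2 : (ch == 'd') = true
        · have hc : ch = 'd' := by simpa using h2
          subst hc
          rw [if_pos h2, ih]
          congr 1 <;> simp [List.count_cons] <;> (push_cast ; ring)
        · rw [if_neg h2]
          by_cases h3 : (ch == 'c') = true
          · have hc : ch = 'c' := by simpa using h3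
            subst hc
            rw [if_pos h3, ih]
            congr 1 <;> simp [List.count_cons] <;> (push_cast ; ring)
          · rw [if_neg h3]
            by_cases h4 : (ch == 'e') = true
            · have hc : ch = 'e' := by simpa using h4
              subst hc
              rw [if_pos h4, ih]
              congr 1 <;> simp [List.count_cons] <;> (push_cast ; ring)
            · rw [if_neg h4]
              by_cases h5 : (ch == 'f') = true
              · have hc : ch = 'f' := by simpa using h5
                subst hc
                rw [if_pos h5, ih]
                congr 1 <;> simp [List.count_cons] <;> (push_cast ; ring)
              · rw [if_neg h5]
                by_cases h6 : (ch == 'g') = true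
                · have hc : ch = 'g' := by simpa using h6
                  subst hc
                  rw [if_pos h6, ih]
                  congr 1 <;> simp [List.count_cons] <;> (push_cast ; ring)
                · rw [if_neg h6]
                  by_cases h7 : (ch == 'h') = true
                  · have hc : ch = 'h' := by simpa using h7
                    subst hc
                    rw [if_pos h7, ih]
                    congr 1 <;> simp [List.count_cons] <;> (push_cast ; ring)
                  · rw [if_neg h7]
                    by_cases h8 : (ch == 'i') = true
                    · have hc : ch = 'i' := by simpa using h8
                      subst hc
                      rw [if_pos h8, ih]
                      congr 1 <;> simp [List.count_cons] <;> (push_cast ; ring)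
                    · rw [if_neg h8]
                      by_cases h9 : (ch == 'j') = true
                      · have hc : ch = 'j' := by simpa using h9
                        subst hc
                        rw [if_pos h9, ih]
                        congr 1 <;> simp [List.count_cons] <;> (push_cast ; ring)
                      · rw [if_neg h9]
                        by_cases h10 : (ch == 'k') = true
                        · have hc : ch = 'k' := by simpa using h10
                          subst hc
                          rw [if_pos h10, ih]
                          congr 1 <;> simp [List.count_cons] <;> (push_cast ; ring)
                        · rw [if_neg h10]
                          by_cases h11 : (ch == 'l') = true
                          · have hc : ch = 'l' := by simpa using h11
                            subst hc
                            rw [if_pos h11, ih]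
                            congr 1 <;> simp [List.count_cons] <;> (push_cast ; ring)
                          · rw [if_neg h11]
                            by_cases h12 : (ch == 'm') = true
                            · have hc : ch = 'm' := by simpa using h12
                              subst hc
                              rw [if_pos h12, ih]
                              congr 1 <;> simp [List.count_cons] <;> (push_cast ; ring)
                            · rw [if_neg h12]
                              by_cases h13 : (ch == 'n') = true
                              · have hc : ch = 'n' := by simpa using h13
                                subst hc
                                rw [if_pos h13, ih]
                                congr 1 <;> simp [List.count_cons] <;> (push_cast ; ring)
                              · rw [if_neg h13]
                                by_cases h14 : (ch == 'o') = true
                                · have hc : ch = 'o' := by simpa using h14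
                                  subst hc
                                  rw [if_pos h14, ih]
                                  congr 1 <;> simp [List.count_cons] <;> (push_cast ; ring)
                                · rw [if_neg h14]
                                  by_cases h15 : (ch == 'p') = true
                                  · have hc : ch = 'p' := by simpa using h15
                                    subst hc
                                    rw [if_pos h15, ih]
                                    congr 1 <;> simp [List.count_cons] <;> (push_cast ; ring)
                                  · rw [if_neg h15]
                                    by_cases h16 : (ch == 'q') = true
                                    · have hc : ch = 'q' := by simpa using h16
                                      subst hc
                                      rw [if_pos h16, ih]
                                      congr 1 <;> simp [List.count_cons] <;> (push_cast ; ring)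
                                    · rw [if_neg h16]
                                      by_cases h17 : (ch == 'r') = true
                                      · have hc : ch = 'r' := by simpa using h17
                                        subst hc
                                        rw [if_pos h17, ih]
                                        congr 1 <;> simp [List.count_cons] <;> (push_cast ; ring)
                                      · rw [if_neg h17]
                                        by_cases h18 : (ch == 's') = true
                                        · have hc : ch = 's' := by simpa using h18
                                          subst hc
                                          rw [if_pos h18, ih]
                                          congr 1 <;> simp [List.count_cons] <;> (push_cast ; ring)
                                        · rw [if_neg h18]
                                          by_cases h19 : (ch == 't') = true
                                          · have hc : ch = 't' := by simpa using h19
                                            subst hc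
                                            rw [if_pos h19, ih]
                                            congr 1 <;> simp [List.count_cons] <;> (push_cast ; ring)
                                          · rw [if_neg h19]
                                            by_cases h20 : (ch == 'u') = true
                                            · have hc : ch = 'u' := by simpa using h20
                                              subst hc
                                              rw [if_pos h20, ih]
                                              congr 1 <;> simp [List.count_cons] <;> (push_cast ; ring)
                                            · rw [if_neg h20]
                                              by_cases h21 : (ch == 'v') = true
                                              · have hc : ch = 'v' := by simpa using h21
                                                subst hc
                                                rw [if_pos h21, ih]
                                                congr 1 <;> simp [List.count_cons] <;> (push_cast ; ring)
                                              · rw [if_neg h21]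
                                                by_cases h22 : (ch == 'w') = true
                                                · have hc : ch = 'w' := by simpa using h22
                                                  subst hc
                                                  rw [if_pos h22, ih]
                                                  congr 1 <;> simp [List.count_cons] <;> (push_cast ; ring)
                                                · rw [if_neg h22]
                                                  by_cases h23 : (ch == 'x') = true
                                                  · have hc : ch = 'x' := by simpa using h23
                                                    subst hc
                                                    rw [if_pos h23, ih]
                                                    congr 1 <;> simp [List.count_cons] <;> (push_cast ; ring)
                                                  · rw [if_neg h23]
                                                    by_cases h24 : (ch == 'y') = true
                                                    · have hc : ch = 'y' := by simpa using h24
                                                      subst hc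
                                                      rw [if_pos h24, ih]
                                                      congr 1 <;> simp [List.count_cons] <;> (push_cast ; ring)
                                                    · rw [if_neg h24]
                                                      by_cases h25 : (ch == 'z') = true
                                                      · have hc : ch = 'z' := by simpa using h25
                                                        subst hc
                                                        rw [if_pos h25, ih]
                                                        congr 1 <;> simp [List.count_cons] <;> (push_cast ; ring)
                                                      · rw [if_neg h25]
                                                        rw [ih]
                                                        congr 1 <;> simp [List.count_cons, (show ch ≠ 'a' by simpa using h0), Ne.symm (show ch ≠ 'a' by simpa using h0), (show ch ≠ 'b' by simpa using h1), Ne.symm (show ch ≠ 'b' by simpa using h1), (show ch ≠ 'd' by simpa using h2), Ne.symm (show ch ≠ 'd' by simpa using h2), (show ch ≠ 'c' by simpa using h3), Ne.symm (show ch ≠ 'c' by simpa using h3), (show ch ≠ 'e' by simpa using h4), Ne.symm (show ch ≠ 'e' by simpa using h4), (show ch ≠ 'f' by simpa using h5), Ne.symm (show ch ≠ 'f' by simpa using h5), (show ch ≠ 'g' by simpa using h6), Ne.symm (show ch ≠ 'g' by simpa using h6), (show ch ≠ 'h' by simpa using h7), Ne.symm (show ch ≠ 'h' by simpa using h7), (show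 ch ≠ 'i' by simpa using h8), Ne.symm (show ch ≠ 'i' by simpa using h8), (show ch ≠ 'j' by simpa using h9), Ne.symm (show ch ≠ 'j' by simpa using h9), (show ch ≠ 'k' by simpa using h10), Ne.symm (show ch ≠ 'k' by simpa using h10), (show ch ≠ 'l' by simpa using h11), Ne.symm (show ch ≠ 'l' by simpa using h11), (show ch ≠ 'm' by simpa using h12), Ne.symm (show ch ≠ 'm' by simpa using h12), (show ch ≠ 'n' by simpa using h13), Ne.symm (show ch ≠ 'n' by simpa using h13), (show ch ≠ 'o' by simpa using h14), Ne.symm (show ch ≠ 'o' by simpa using h14), (show ch ≠ 'p' by simpa using h15), Ne.symm (show ch ≠ 'p' by simpa using h15), (show ch ≠ 'q' by simpa using h16), Ne.symm (show ch ≠ 'q' by simpa using h16), (show ch ≠ 'r' by simpa using h17), Ne.symm (show ch ≠ 'r' by simpa using h17), (show ch ≠ 's' by simpa using h18), Ne.symm (show ch ≠ 's' by simpa using h18), (show ch ≠ 't' by simpa using h19), Ne.symm (show ch ≠ 't' by simpa using h19), (show ch ≠ 'u' by simpa using h20), Ne.symm (show ch ≠ 'u' by simpa using h20), (show ch ≠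 'v' by simpa using h21), Ne.symm (show ch ≠ 'v' by simpa using h21), (show ch ≠ 'w' by simpa using h22), Ne.symm (show ch ≠ 'w' by simpa using h22), (show ch ≠ 'x' by simpa using h23), Ne.symm (show ch ≠ 'x' by simpa using h23), (show ch ≠ 'y' by simpa using h24), Ne.symm (show ch ≠ 'y' by simpa using h24), (show ch ≠ 'z' by simpa using h25), Ne.symm (show ch ≠ 'z' by simpa using h25)]

lemma iteBeqTrue (M e : Int) : ((if M == e then true else false) = true) ↔ M = e := by
  by_cases hc : M = e <;> simp [hc]

lemma finalIff (a b c d e f g h i j k l m n o p q r s t u v w x y z : Int) :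
    (freqTestFinal a b c d e f g h i j k l m n o p q r s t u v w x y z = true) ↔ (a ≤ e ∧ b ≤ e ∧ c ≤ e ∧ d ≤ e ∧ f ≤ e ∧ g ≤ e ∧ h ≤ e ∧ i ≤ e ∧ j ≤ e ∧ k ≤ e ∧ l ≤ e ∧ m ≤ e ∧ n ≤ e ∧ o ≤ e ∧ p ≤ e ∧ q ≤ e ∧ r ≤ e ∧ s ≤ e ∧ t ≤ e ∧ u ≤ e ∧ v ≤ e ∧ w ≤ e ∧ x ≤ e ∧ y ≤ e ∧ z ≤ e) := by
  have h1 : (freqTestFinal a b c d e f g h i j k l m n o p q r s t u v w x y z = true) ↔ (max a (max b (max c (max d (max e (max f (max g (max h (max i (max j (max k (max l (max m (max n (max o (max p (max q (max r (max s (max t (max u (max v (max w (max x (max y (z)))))))))))))))))))))))))) = e := by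
    unfold freqTestFinal
    exact iteBeqTrue _ _
  rw [h1, le_antisymm_iff]
  simp only [max_le_iff, le_max_iff]
  omega

lemma altIff (text : String) :
    (freqTest_alt text = true) ↔ (text.toList.count 'a' ≤ text.toList.count 'e' ∧ text.toList.count 'b' ≤ text.toList.count 'e' ∧ text.toList.count 'c' ≤ text.toList.count 'e' ∧ text.toList.count 'd' ≤ text.toList.count 'e' ∧ text.toList.count 'f' ≤ text.toList.count 'e' ∧ text.toList.count 'g' ≤ text.toList.count 'e' ∧ text.toList.count 'h' ≤ text.toList.count 'e' ∧ text.toList.count 'i' ≤ text.toList.count 'e' ∧ text.toList.count 'j' ≤ text.toList.count 'e' ∧ text.toList.count 'k' ≤ text.toList.count 'e' ∧ text.toList.count 'l' ≤ text.toList.count 'e' ∧ text.toList.count 'm' ≤ text.toList.count 'e' ∧ text.toList.count 'n' ≤ text.toList.count 'e' ∧ text.toList.count 'o' ≤ text.toList.count 'e' ∧ text.toList.count 'p' ≤ text.toList.count 'e' ∧ text.toList.count 'q' ≤ text.toList.count 'e' ∧ text.toList.count 'r' ≤ text.toList.count 'e' ∧ text.toList.count 's' ≤ text.toList.count 'e'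 ∧ text.toList.count 't' ≤ text.toList.count 'e' ∧ text.toList.count 'u' ≤ text.toList.count 'e' ∧ text.toList.count 'v' ≤ text.toList.count 'e' ∧ text.toList.count 'w' ≤ text.toList.count 'e' ∧ text.toList.count 'x' ≤ text.toList.count 'e' ∧ text.toList.count 'y' ≤ text.toList.count 'e' ∧ text.toList.count 'z' ≤ text.toList.count 'e') := by
  unfold freqTest_alt
  have hl : "abcdfghijklmnopqrstuvwxyz".toList = ['a','b','c','d','f','g','h','i','j','k','l','m','n','o','p','q','r','s','t','u','v','w','x','y','z'] := rfl
  rw [hl]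
  simp [charsCountSingleton, and_assoc]

lemma aChar (text : String) :
    (freqTest text = true) ↔ (text.toList.count 'b' ≤ text.toList.count 'e' ∧ text.toList.count 'c' ≤ text.toList.count 'e' ∧ text.toList.count 'd' ≤ text.toList.count 'e' ∧ text.toList.count 'f' ≤ text.toList.count 'e' ∧ text.toList.count 'g' ≤ text.toList.count 'e' ∧ text.toList.count 'h' ≤ text.toList.count 'e' ∧ text.toList.count 'i' ≤ text.toList.count 'e' ∧ text.toList.count 'j' ≤ text.toList.count 'e' ∧ text.toList.count 'k' ≤ text.toList.count 'e' ∧ text.toList.count 'l' ≤ text.toList.count 'e' ∧ text.toList.count 'm' ≤ text.toList.count 'e' ∧ text.toList.count 'n' ≤ text.toList.count 'e' ∧ text.toList.count 'o' ≤ text.toList.count 'e' ∧ text.toList.count 'p' ≤ text.toList.count 'e' ∧ text.toList.count 'q' ≤ text.toList.count 'e' ∧ text.toList.count 'r' ≤ text.toList.count 'e' ∧ text.toList.count 's' ≤ text.toList.count 'e' ∧ text.toList.count 't' ≤ text.toList.count 'e' ∧ text.toList.count 'u' ≤ text.toList.count 'e' ∧ text.toList.count 'v' ≤ text.toList.count 'e'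 ∧ text.toList.count 'w' ≤ text.toList.count 'e' ∧ text.toList.count 'x' ≤ text.toList.count 'e' ∧ text.toList.count 'y' ≤ text.toList.count 'e' ∧ text.toList.count 'z' ≤ text.toList.count 'e') := by
  unfold freqTest
  rw [loopCount text.toList 0 0 0 0 0 0 0 0 0 0 0 0 0 0 0 0 0 0 0 0 0 0 0 0 0, finalIff]
  omega

lemma dExpand (text : String) : D_freqTest text ↔
    (text.toList.count 'e' < text.toList.count 'a' ∧
     ∀ ch ∈ ['b','c','d','f','g','h','i','j','k','l','m','n','o','p','q','r','s','t','u','v','w','x','y','z'], text.toList.count ch ≤ text.toList.count 'e') := by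
  unfold D_freqTest
  exact Iff.rfl

-- ===== VERDICT (by name: the statement is the Claim_ definition above) =====
theorem freqTest_spec : Claim_unchanged_freqTest := by
  intro text _ hnD
  rw [dExpand] at hnD
  simp [List.forall_mem_cons] at hnD
  rw [Bool.eq_iff_iff, aChar, altIff]
  omega

set_option maxRecDepth 4096 in
theorem freqTest_changed : Claim_changed_freqTest := by
  unfold Claim_changed_freqTest
  refine ⟨by decide, ?_, ?_, ?_, by decide⟩
  · rw [dExpand]
    refine ⟨by decide, ?_⟩
    intro ch hch
    fin_cases hch <;> decide
  · exact (aChar _).mpr (by decide)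
  · have h : ¬ (freqTest_alt pvDiffWitness_freqTest = true) := by
      rw [altIff]; decide
    simpa using h

theorem freqTest_tight : Claim_exact_freqTest := by
  intro text _ hD
  rw [dExpand] at hD
  simp [List.forall_mem_cons] at hD
  rw [Ne, Bool.eq_iff_iff, aChar, altIff]
  omega
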